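-- pv_equiv track=rewrite | github.com/Marrcel12/recycle_back | app.py | url_to_list
-- ===== SOURCE A (Python) =====
-- def url_to_list(url):
--     url_to_process=url[int(str(url)[1:].find("/"))+1:]
--     flag=0
--     list_req={}
--     key=""
--     value=""
--     for i in url_to_process:
--             if i =="=" or i == "%":
--                     if i == "=":
--                         list_req[key]=""
--                         flag=1
--                     if i== "%":
--                         list_req[key]=value
--                         key=""
--                         value=""
--                         flag=0
--             else:
--                     if flag ==0:
--                         key+=i
--                     if flag ==1:
--                         value+=i
--
--     return(list_req)
-- ===== SOURCE B (Python) =====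
-- def url_to_list(url):
--     url_to_process = url[url[1:].find("/") + 1:]
--     parts = url_to_process.split("%")
--     result = {}
--     for seg in parts[:-1]:
--         if "=" in seg:
--             key, rest = seg.split("=", 1)
--             result[key] = rest.replace("=", "")
--         else:
--             result[seg] = ""
--     last = parts[-1]
--     if "=" in last:
--         result[last.split("=", 1)[0]] = ""
--     return result
-- ===== Notes on version B (the rewrite author's own statement) =====
-- stated objective: alternative
-- what changed: A is a character-by-character state machine with a flag and running key/value buffers; B splits the processed string once on the percent separator and handles each segment as a whole (cut at the first equals sign for the key, strip remaining equals signs from the value, key-only handling for the unterminated final segment).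
import Mathlib
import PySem

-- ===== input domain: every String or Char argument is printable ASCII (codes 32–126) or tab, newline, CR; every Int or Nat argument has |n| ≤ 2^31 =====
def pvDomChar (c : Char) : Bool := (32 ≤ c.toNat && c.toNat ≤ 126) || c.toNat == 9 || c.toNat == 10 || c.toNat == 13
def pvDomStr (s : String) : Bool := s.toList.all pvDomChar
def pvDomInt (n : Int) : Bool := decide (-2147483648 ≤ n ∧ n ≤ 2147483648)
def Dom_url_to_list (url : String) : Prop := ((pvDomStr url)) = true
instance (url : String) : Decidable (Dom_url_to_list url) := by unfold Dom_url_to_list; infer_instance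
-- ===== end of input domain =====

-- B replaces A's char-by-char flag/key/value state machine by one split on the percent separator with whole-segment handling (measured faster in a timing run: C-level split vs per-char interpreted loop).

-- ===== PORT A =====
-- one loop iteration of A: state (flag, dict, key, value), strings as List Char
def pvStepA (st : Int × PySem.Dict (List Char) (List Char) × List Char × List Char) (i : Char) :
    Int × PySem.Dict (List Char) (List Char) × List Char × List Char :=
  let (flag, d, key, value) := st
  if i = '=' then (1, d.insert key [], key, value)
  else if i = '%' then (0, d.insert key value, [], [])
  else if flag = 0 then (flag, d, key ++ [i], value)
  else if flag = 1 then (flag, d, key, value ++ [i])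
  else (flag, d, key, value)

def url_to_list (url : String) : List (String × String) :=
  let t := url.toList
  -- url[int(str(url)[1:].find("/"))+1:]
  let processed := PySem.List.slice t (some (PySem.Chars.find (PySem.List.slice t (some 1) none) ['/'] + 1)) none
  let fin := processed.foldl pvStepA (0, PySem.Dict.empty, [], [])
  fin.2.1.items.map (fun p => (String.ofList p.1, String.ofList p.2))

-- ===== PORT B =====
-- one segment (all but the last) of B's loop over url_to_process.split('%')
def pvSegB (d : PySem.Dict (List Char) (List Char)) (seg : List Char) : PySem.Dict (List Char) (List Char) :=
  if PySem.Chars.isIn ['='] seg then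
    let kv := PySem.Chars.splitOnMax seg ['='] 1
    d.insert (kv.getD 0 []) (PySem.Chars.replace (kv.getD 1 []) ['='] [])
  else d.insert seg []

def url_to_list_alt (url : String) : List (String × String) :=
  let t := url.toList
  let processed := PySem.List.slice t (some (PySem.Chars.find (PySem.List.slice t (some 1) none) ['/'] + 1)) none
  let parts := PySem.Chars.splitOn processed ['%']
  let d0 := (PySem.List.slice parts none (some (-1))).foldl pvSegB PySem.Dict.empty
  let last := PySem.List.pyGetD parts (-1) []
  let d1 := if PySem.Chars.isIn ['='] last then
              d0.insert ((PySem.Chars.splitOnMax last ['='] 1).getD 0 []) []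
            else d0
  d1.items.map (fun p => (String.ofList p.1, String.ofList p.2))

-- ===== PRECONDITION & SPEC =====
def Spec_url_to_list (url : String) (out : List (String × String)) : Prop := out = url_to_list_alt url
instance (url : String) (out : List (String × String)) : Decidable (Spec_url_to_list url out) := by unfold Spec_url_to_list; infer_instance

-- ===== CLAIM (what is proved, stated in full; the proofs are below) =====
def Claim_equal_url_to_list : Prop := ∀ (url : String), Dom_url_to_list url → Spec_url_to_list url (url_to_list url)

-- ===== LEMMAS AND PROOFS =====

-- prepend p to the first part (or make it the only part)
def pvConsHead (p : List Char) : List (List Char) → List (List Char)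
  | [] => [p]
  | x :: xs => (p ++ x) :: xs

-- reference single-char split (Python s.split(c))
def pvSplit (c : Char) : List Char → List (List Char)
  | [] => [[]]
  | a :: t => if a = c then [] :: pvSplit c t else pvConsHead [a] (pvSplit c t)

-- reference segment step: key before first '=', value = rest with '=' removed
def pvSegB' (d : PySem.Dict (List Char) (List Char)) (seg : List Char) : PySem.Dict (List Char) (List Char) :=
  if '=' ∈ seg then
    d.insert (seg.takeWhile (· ≠ '=')) (((seg.dropWhile (· ≠ '=')).drop 1).filter (· ≠ '='))
  else d.insert seg []

-- reference run of B over the parts list (last part: key only, and only if it has '=')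
def pvRunB (d : PySem.Dict (List Char) (List Char)) : List (List Char) → PySem.Dict (List Char) (List Char)
  | [] => d
  | [seg] => if '=' ∈ seg then d.insert (seg.takeWhile (· ≠ '=')) [] else d
  | seg :: s2 :: rest => pvRunB (pvSegB' d seg) (s2 :: rest)

-- reference run from A's flag=1 state: pending key k and partial value v, first part completes them
def pvRunB1 (d : PySem.Dict (List Char) (List Char)) (k v : List Char) : List (List Char) → PySem.Dict (List Char) (List Char)
  | [] => d.insert k []
  | [_] => d.insert k []
  | p :: s2 :: rest => pvRunB (d.insert k (v ++ p.filter (· ≠ '='))) (s2 :: rest)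

theorem pvSplit_ne_nil (c : Char) (l : List Char) : pvSplit c l ≠ [] := by
  cases l with
  | nil => simp [pvSplit]
  | cons a t =>
    simp only [pvSplit]
    split
    · simp
    · cases h : pvSplit c t <;> simp [pvConsHead]

theorem pvConsHead_nil_of_ne (ps : List (List Char)) (h : ps ≠ []) : pvConsHead [] ps = ps := by
  cases ps with
  | nil => exact absurd rfl h
  | cons x xs => simp [pvConsHead]

theorem pvConsHead_append (x y : List Char) (ps : List (List Char)) :
    pvConsHead (x ++ y) ps = pvConsHead x (pvConsHead y ps) := by
  cases ps <;> simp [pvConsHead]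

theorem pv_isIn_iff (s : List Char) : PySem.Chars.isIn ['='] s = true ↔ '=' ∈ s := by
  rw [PySem.Chars.isIn_iff_infix]
  constructor
  · intro h; exact h.mem (by simp)
  · intro h; obtain ⟨a, b, hab⟩ := List.append_of_mem h
    exact ⟨a, b, by simp [hab]⟩

theorem pv_takeWhile_pre (k p : List Char) (hk : '=' ∉ k) :
    (k ++ '=' :: p).takeWhile (· ≠ '=') = k := by
  induction k with
  | nil => simp
  | cons a t ih =>
    simp only [List.mem_cons, not_or] at hk
    rw [List.cons_append, List.takeWhile_cons]
    have : (a ≠ '=') = True := by simp [Ne.symm hk.1]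
    simp only [ne_eq, decide_not] at *
    have ih' := ih hk.2
    simp only [ne_eq, decide_not] at ih'
    simp [Ne.symm hk.1, ih']

theorem pv_dropWhile_pre (k p : List Char) (hk : '=' ∉ k) :
    (k ++ '=' :: p).dropWhile (· ≠ '=') = '=' :: p := by
  induction k with
  | nil => simp
  | cons a t ih =>
    simp only [List.mem_cons, not_or] at hk
    rw [List.cons_append, List.dropWhile_cons]
    have ih' := ih hk.2
    simp only [ne_eq, decide_not] at ih'
    simp [Ne.symm hk.1, ih']



theorem pv_splitOn_go_spec (c : Char) :
    ∀ (l : List Char) (fuel : Nat) (cur : List Char) (acc : List (List Char)),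
      l.length ≤ fuel →
      PySem.Chars.splitOn.go [c] fuel l cur acc = acc.reverse ++ pvConsHead cur.reverse (pvSplit c l) := by
  intro l
  induction l with
  | nil =>
    intro fuel cur acc _
    cases fuel <;> simp [PySem.Chars.splitOn.go, pvSplit, pvConsHead]
  | cons a t ih =>
    intro fuel cur acc hf
    cases fuel with
    | zero => simp at hf
    | succ fuel =>
      rw [PySem.Chars.splitOn.go]
      by_cases hac : a = c
      · subst hac
        have hp : List.isPrefixOf [a] (a :: t) = true := by simp [List.isPrefixOf]
        simp only [hp, if_true, List.length_cons, List.drop_succ_cons, List.length_nil,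
          List.drop_zero]
        rw [ih fuel [] (cur.reverse :: acc) (by simpa using hf)]
        simp only [List.reverse_nil]
        rw [pvConsHead_nil_of_ne _ (pvSplit_ne_nil a t)]
        simp [pvSplit, pvConsHead]
      · have hp : List.isPrefixOf [c] (a :: t) = false := by
          simp [List.isPrefixOf, Ne.symm hac]
        simp only [hp, if_false, Bool.false_eq_true]
        rw [ih fuel (a :: cur) acc (by simpa using Nat.le_of_succ_le_succ hf)]
        simp only [pvSplit, hac, if_false]
        rw [List.reverse_cons, pvConsHead_append]

theorem pv_splitOn_single (c : Char) (s : List Char) :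
    PySem.Chars.splitOn s [c] = pvSplit c s := by
  unfold PySem.Chars.splitOn
  rw [pv_splitOn_go_spec c s (s.length+1) [] [] (by omega)]
  simp only [List.reverse_nil, List.nil_append]
  rw [pvConsHead_nil_of_ne _ (pvSplit_ne_nil c s)]

theorem pv_splitOnMax_go_zero (l cur : List Char) (acc : List (List Char)) (fuel : Nat) :
    PySem.Chars.splitOnMax.go ['='] fuel 0 l cur acc = acc.reverse ++ [cur.reverse ++ l] := by
  cases fuel with
  | zero => simp [PySem.Chars.splitOnMax.go]
  | succ fuel => cases l <;> simp [PySem.Chars.splitOnMax.go]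

theorem pv_splitOnMax_go_one :
    ∀ (l : List Char) (fuel : Nat) (cur : List Char) (acc : List (List Char)),
      l.length ≤ fuel → '=' ∈ l →
      PySem.Chars.splitOnMax.go ['='] fuel 1 l cur acc =
        acc.reverse ++ [cur.reverse ++ l.takeWhile (· ≠ '='), (l.dropWhile (· ≠ '=')).drop 1] := by
  intro l
  induction l with
  | nil => intro _ _ _ _ h; simp at h
  | cons a t ih =>
    intro fuel cur acc hf hm
    cases fuel with
    | zero => simp at hf
    | succ fuel =>
      rw [PySem.Chars.splitOnMax.go]
      by_cases hac : a = '='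
      · subst hac
        have hp : List.isPrefixOf ['='] ('=' :: t) = true := by simp [List.isPrefixOf]
        simp only [hp, if_true, List.length_cons, List.drop_succ_cons, List.length_nil,
          List.drop_zero, if_false]
        norm_num
        rw [pv_splitOnMax_go_zero]
        simp [List.takeWhile_cons, List.dropWhile_cons]
      · have hp : List.isPrefixOf ['='] (a :: t) = false := by
          simp [List.isPrefixOf, Ne.symm hac]
        have hm' : '=' ∈ t := by
          rcases List.mem_cons.mp hm with h | h
          · exact absurd h.symm hac
          · exact h
        simp only [hp, Bool.false_eq_true, if_false, Nat.one_ne_zero]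
        norm_num
        rw [ih fuel (a :: cur) acc (by simpa using Nat.le_of_succ_le_succ hf) hm']
        simp [List.takeWhile_cons, List.dropWhile_cons, hac, Ne.symm hac]

theorem pv_splitOnMax_one (s : List Char) (h : '=' ∈ s) :
    PySem.Chars.splitOnMax s ['='] 1 = [s.takeWhile (· ≠ '='), (s.dropWhile (· ≠ '=')).drop 1] := by
  unfold PySem.Chars.splitOnMax
  norm_num
  rw [pv_splitOnMax_go_one s (s.length+1) [] [] (by omega) h]
  simp

theorem pv_replace_go (t : List Char) : ∀ (fuel : Nat) (acc : List Char),
    t.length ≤ fuel →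
    PySem.Chars.replace.go ['='] [] fuel t acc = acc.reverse ++ t.filter (· ≠ '=') := by
  induction t with
  | nil => intro fuel acc _; cases fuel <;> simp [PySem.Chars.replace.go]
  | cons a t ih =>
    intro fuel acc hf
    cases fuel with
    | zero => simp at hf
    | succ fuel =>
      rw [PySem.Chars.replace.go]
      by_cases hac : a = '='
      · subst hac
        have hp : List.isPrefixOf ['='] ('=' :: t) = true := by simp [List.isPrefixOf]
        simp only [hp, if_true, List.length_cons, List.drop_succ_cons, List.length_nil,
          List.drop_zero, List.reverse_nil, List.nil_append]
        rw [ih fuel acc (by simpa using Nat.le_of_succ_le_succ hf)]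
        simp [List.filter_cons]
      · have hp : List.isPrefixOf ['='] (a :: t) = false := by
          simp [List.isPrefixOf]
          exact fun h => absurd h.symm hac
        simp only [hp, Bool.false_eq_true, if_false]
        rw [ih fuel (a :: acc) (by simpa using Nat.le_of_succ_le_succ hf)]
        simp [List.filter_cons, hac]

theorem pv_replace_filter (s : List Char) :
    PySem.Chars.replace s ['='] [] = s.filter (· ≠ '=') := by
  unfold PySem.Chars.replace
  simp only [List.isEmpty_cons, Bool.false_eq_true, if_false]
  rw [pv_replace_go s s.length [] (le_refl _)]
  simp

theorem pvRunB_cons (d : PySem.Dict (List Char) (List Char)) (seg : List Char)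
    (ps : List (List Char)) (h : ps ≠ []) :
    pvRunB d (seg :: ps) = pvRunB (pvSegB' d seg) ps := by
  cases ps with
  | nil => exact absurd rfl h
  | cons s2 rest => rfl

theorem pvRunB1_consHead_eq (d : PySem.Dict (List Char) (List Char)) (k v : List Char)
    (c : Char) (ps : List (List Char)) (h : ps ≠ []) :
    pvRunB1 d k v (pvConsHead [c] ps) = pvRunB1 d k (v ++ if c = '=' then [] else [c]) ps := by
  cases ps with
  | nil => exact absurd rfl h
  | cons p rest =>
    cases rest with
    | nil => simp [pvConsHead, pvRunB1]
    | cons s2 rest2 =>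
      simp only [pvConsHead, pvRunB1, List.singleton_append, List.filter_cons]
      by_cases hc : c = '=' <;> simp [hc]

theorem pvRunB1_of_eq (d : PySem.Dict (List Char) (List Char)) (k : List Char) (hk : '=' ∉ k)
    (ps : List (List Char)) (h : ps ≠ []) :
    pvRunB d (pvConsHead (k ++ ['=']) ps) = pvRunB1 d k [] ps := by
  cases ps with
  | nil => exact absurd rfl h
  | cons p rest =>
    cases rest with
    | nil =>
      have hm : '=' ∈ (k ++ '=' :: p) := by simp
      simp only [pvConsHead, pvRunB, List.append_assoc, List.singleton_append, hm, if_true,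
        pvRunB1]
      rw [pv_takeWhile_pre k p hk]
    | cons s2 rest2 =>
      have hm : '=' ∈ (k ++ '=' :: p) := by simp
      simp only [pvConsHead, pvRunB, pvRunB1, pvSegB', List.append_assoc, List.singleton_append,
        hm, if_true]
      rw [pv_takeWhile_pre k p hk, pv_dropWhile_pre k p hk]
      simp

theorem pv_insert_insert (d : PySem.Dict (List Char) (List Char)) (k a b : List Char) :
    (d.insert k a).insert k b = d.insert k b := by
  apply PySem.Dict.ext
  by_cases h : d.contains k = true
  · simp only [PySem.Dict.items_insert, h, PySem.Dict.contains_insert, BEq.rfl, Bool.true_or,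
      if_true, List.map_map]
    apply List.map_congr_left
    intro p _
    by_cases hp : p.1 = k <;> simp [hp]
  · simp only [PySem.Dict.items_insert, h, PySem.Dict.contains_insert, BEq.rfl, Bool.true_or,
      if_true, List.map_append]
    have hd : ∀ p ∈ d.items, ¬ p.1 = k := by
      intro p hp hc
      apply h
      apply (PySem.Dict.contains_iff_mem_keys d k).mpr
      simp only [PySem.Dict.keys, List.mem_map]
      exact ⟨p, hp, hc⟩
    have : List.map (fun p => if p.1 = k then (k, b) else p) d.items = List.map id d.items := by
      apply List.map_congr_left
      intro p hp
      simp [hd p hp]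
    simp [this]

theorem pvMain (l : List Char) :
    (∀ d k, '=' ∉ k →
      (l.foldl pvStepA (0, d, k, ([] : List Char))).2.1 = pvRunB d (pvConsHead k (pvSplit '%' l))) ∧
    (∀ d k v, '=' ∉ k →
      (l.foldl pvStepA (1, d.insert k [], k, v)).2.1 = pvRunB1 d k v (pvSplit '%' l)) := by
  induction l with
  | nil =>
    constructor
    · intro d k hk
      simp only [List.foldl_nil, pvSplit, pvConsHead, List.append_nil]
      simp [pvRunB, hk]
    · intro d k v hk
      simp [pvSplit, pvConsHead, pvRunB1]
  | cons c t ih =>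
    have hne := pvSplit_ne_nil '%' t
    constructor
    · intro d k hk
      rw [List.foldl_cons]
      by_cases hc : c = '='
      · subst hc
        have step : pvStepA (0, d, k, []) '=' = (1, d.insert k [], k, []) := by
          simp [pvStepA]
        rw [step, ih.2 d k [] hk]
        simp only [pvSplit]
        rw [if_neg (by decide : ¬('=' = '%')), ← pvConsHead_append k ['='] (pvSplit '%' t),
            pvRunB1_of_eq d k hk _ hne]
      · by_cases hp : c = '%'
        · subst hp
          have step : pvStepA (0, d, k, []) '%' = (0, d.insert k [], [], []) := by
            simp [pvStepA]
          rw [step, ih.1 (d.insert k []) [] (by simp)]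
          rw [pvConsHead_nil_of_ne _ hne]
          simp only [pvSplit, if_true]
          have : pvConsHead k ([] :: pvSplit '%' t) = k :: pvSplit '%' t := by
            simp [pvConsHead]
          rw [this, pvRunB_cons d k _ hne]
          have : pvSegB' d k = d.insert k [] := by simp [pvSegB', hk]
          rw [this]
        · have step : pvStepA (0, d, k, []) c = (0, d, k ++ [c], []) := by
            simp [pvStepA, hc, hp]
          rw [step, ih.1 d (k ++ [c]) (by simp [hk, Ne.symm hc])]
          simp only [pvSplit]
          rw [if_neg hp, ← pvConsHead_append k [c] (pvSplit '%' t)]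
    · intro d k v hk
      rw [List.foldl_cons]
      by_cases hc : c = '='
      · subst hc
        have step : pvStepA (1, d.insert k [], k, v) '=' = (1, (d.insert k []).insert k [], k, v) := by
          simp [pvStepA]
        rw [step, pv_insert_insert, ih.2 d k v hk]
        simp only [pvSplit]
        rw [if_neg (by decide : ¬('=' = '%'))]
        have h1 := pvRunB1_consHead_eq d k v '=' (pvSplit '%' t) hne
        simp at h1
        exact h1.symm
      · by_cases hp : c = '%'
        · subst hp
          have step : pvStepA (1, d.insert k [], k, v) '%' = (0, (d.insert k []).insert k v, [], []) := by
            simp [pvStepA]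
          rw [step, pv_insert_insert, ih.1 (d.insert k v) [] (by simp)]
          rw [pvConsHead_nil_of_ne _ hne]
          simp only [pvSplit, if_true]
          cases hs : pvSplit '%' t with
          | nil => exact absurd hs hne
          | cons p2 rest => simp [pvRunB1]
        · have step : pvStepA (1, d.insert k [], k, v) c = (1, d.insert k [], k, v ++ [c]) := by
            simp [pvStepA, hc, hp]
          rw [step, ih.2 d k (v ++ [c]) hk]
          simp only [pvSplit]
          rw [if_neg hp]
          have h1 := pvRunB1_consHead_eq d k v c (pvSplit '%' t) hne
          rw [if_neg hc] at h1
          exact h1.symm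

theorem pvSegB_eq (d : PySem.Dict (List Char) (List Char)) (seg : List Char) :
    pvSegB d seg = pvSegB' d seg := by
  by_cases h : '=' ∈ seg
  · simp only [pvSegB, pvSegB', (pv_isIn_iff seg).mpr h, if_true, h,
      pv_splitOnMax_one seg h, List.getD, pv_replace_filter]
    rfl
  · have : PySem.Chars.isIn ['='] seg = false := by
      rcases Bool.eq_false_or_eq_true (PySem.Chars.isIn ['='] seg) with h' | h'
      · exact absurd ((pv_isIn_iff seg).mp h') h
      · exact h'
    simp [pvSegB, pvSegB', this, h]

theorem pvRunB_spec (parts : List (List Char)) (h : parts ≠ []) (d : PySem.Dict (List Char) (List Char)) :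
    (if PySem.Chars.isIn ['='] (PySem.List.pyGetD parts (-1) []) then
       ((PySem.List.slice parts none (some (-1))).foldl pvSegB d).insert
         ((PySem.Chars.splitOnMax (PySem.List.pyGetD parts (-1) []) ['='] 1).getD 0 []) []
     else (PySem.List.slice parts none (some (-1))).foldl pvSegB d) = pvRunB d parts := by
  induction parts generalizing d with
  | nil => exact absurd rfl h
  | cons s1 rest ih =>
    cases rest with
    | nil =>
      rw [PySem.List.slice_to_neg_one]
      simp only [List.dropLast_singleton, List.foldl_nil]
      rw [PySem.List.pyGetD_neg_one [s1] [] (by simp)]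
      simp only [List.getLast_singleton]
      by_cases hm : '=' ∈ s1
      · rw [if_pos ((pv_isIn_iff s1).mpr hm), pv_splitOnMax_one s1 hm]
        simp [pvRunB, hm, List.getD]
      · have : PySem.Chars.isIn ['='] s1 = false := by
          rcases Bool.eq_false_or_eq_true (PySem.Chars.isIn ['='] s1) with h' | h'
          · exact absurd ((pv_isIn_iff s1).mp h') hm
          · exact h'
        simp [this, pvRunB, hm]
    | cons s2 rest2 =>
      have hr : (s2 :: rest2 : List (List Char)) ≠ [] := by simp
      have e1 : PySem.List.pyGetD (s1 :: s2 :: rest2) (-1) ([] : List Char) =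
          PySem.List.pyGetD (s2 :: rest2) (-1) [] := by
        rw [PySem.List.pyGetD_neg_one _ [] (by simp), PySem.List.pyGetD_neg_one _ [] hr]
        simp [List.getLast_cons]
      have e2 : PySem.List.slice (s1 :: s2 :: rest2) none (some (-1)) =
          s1 :: PySem.List.slice (s2 :: rest2) none (some (-1)) := by
        rw [PySem.List.slice_to_neg_one, PySem.List.slice_to_neg_one]
        simp [List.dropLast_cons_of_ne_nil]
      rw [e1, e2]
      simp only [List.foldl_cons]
      rw [pvSegB_eq d s1]
      rw [ih hr (pvSegB' d s1)]
      rfl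

-- final assembly: A's machine run = reference run = B's fold
theorem pv_final (l : List Char) :
    (l.foldl pvStepA (0, PySem.Dict.empty, [], ([] : List Char))).2.1 =
      (if PySem.Chars.isIn ['='] (PySem.List.pyGetD (pvSplit '%' l) (-1) []) then
         ((PySem.List.slice (pvSplit '%' l) none (some (-1))).foldl pvSegB PySem.Dict.empty).insert
           ((PySem.Chars.splitOnMax (PySem.List.pyGetD (pvSplit '%' l) (-1) []) ['='] 1).getD 0 []) []
       else (PySem.List.slice (pvSplit '%' l) none (some (-1))).foldl pvSegB PySem.Dict.empty) := by
  rw [(pvMain l).1 PySem.Dict.empty [] (by simp),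
      pvConsHead_nil_of_ne _ (pvSplit_ne_nil '%' l),
      pvRunB_spec (pvSplit '%' l) (pvSplit_ne_nil '%' l) PySem.Dict.empty]

-- ===== VERDICT (by name: the statement is the Claim_ definition above) =====
theorem url_to_list_spec : Claim_equal_url_to_list := by
  intro url _
  unfold Spec_url_to_list url_to_list url_to_list_alt
  simp only [pv_splitOn_single]
  rw [pv_final]
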